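-- pv_equiv track=rewrite | github.com/drmfurqan/G-G-interaction-on-AffHuExArr-python | helper.py | FindNTstack
-- ===== SOURCE A (Python) =====
-- def FindNTstack(sequence, nt):
--     found = 0
--     g_loc = 0
--     for i in range(len(sequence)-3):
--         if (sequence[i]== nt) and (sequence[i+1]== nt) and (sequence[i+2]==nt) and (sequence[i+3]==nt) :
--             found += 1
--             g_loc = i
--
--     if found != 1 :
--         return -1
--     else:
--         return (g_loc + 1)
-- ===== SOURCE B (Python) =====
-- def FindNTstack(sequence, nt):
--     found = 0
--     g_loc = 0
--     run = 0
--     for i, ch in enumerate(sequence):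
--         run = run + 1 if ch == nt else 0
--         if run >= 4:
--             found += 1
--             g_loc = i - 3
--     return -1 if found != 1 else g_loc + 1
-- ===== Notes on version B (the rewrite author's own statement) =====
-- stated objective: alternative
-- what changed: Replaces the per-index four-neighbor window test with a single pass over the characters maintaining a run-length counter of consecutive matches; a window is detected when the counter reaches 4, at start index i-3.
import Mathlib
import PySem

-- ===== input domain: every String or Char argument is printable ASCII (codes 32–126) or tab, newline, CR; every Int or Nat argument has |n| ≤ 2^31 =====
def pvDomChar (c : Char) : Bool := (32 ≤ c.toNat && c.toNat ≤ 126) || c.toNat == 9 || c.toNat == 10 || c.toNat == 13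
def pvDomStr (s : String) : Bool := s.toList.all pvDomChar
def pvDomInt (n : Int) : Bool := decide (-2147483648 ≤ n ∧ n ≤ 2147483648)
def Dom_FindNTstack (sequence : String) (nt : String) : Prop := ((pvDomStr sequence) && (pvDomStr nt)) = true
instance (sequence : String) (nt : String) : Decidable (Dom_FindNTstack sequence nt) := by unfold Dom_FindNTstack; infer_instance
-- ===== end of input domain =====

-- B replaces the per-index four-neighbor window test with one pass keeping a run-length
-- counter of consecutive matches (alternative decomposition, same O(n) cost).

-- ===== PORT A =====
-- sequence[i] == nt : Python compares the one-char string slice with nt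
def pvEq (s : List Char) (i : Int) (nt : List Char) : Bool :=
  match PySem.List.pyGet? s i with
  | some c => nt == [c]
  | none => false

def FindNTstack (sequence : String) (nt : String) : Int :=
  let s := sequence.toList
  let st := (PySem.List.pyRange 0 ((s.length : Int) - 3) 1).foldl
    (fun (st : Int × Int) i =>
      if pvEq s i nt.toList && pvEq s (i+1) nt.toList && pvEq s (i+2) nt.toList
          && pvEq s (i+3) nt.toList
      then (st.1 + 1, i) else st) (0, 0)
  if st.1 ≠ 1 then -1 else st.2 + 1

-- ===== PORT B =====
def FindNTstack_alt (sequence : String) (nt : String) : Int :=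
  let st := (PySem.List.enumerate sequence.toList 0).foldl
    (fun (st : Int × Int × Int) p =>
      let run := if nt.toList == [p.2] then st.1 + 1 else 0
      if run ≥ 4 then (run, st.2.1 + 1, p.1 - 3) else (run, st.2.1, st.2.2))
    (0, 0, 0)
  if st.2.1 ≠ 1 then -1 else st.2.2 + 1

-- ===== PRECONDITION & SPEC =====
def Spec_FindNTstack (sequence : String) (nt : String) (out : Int) : Prop := out = FindNTstack_alt sequence nt
instance (sequence : String) (nt : String) (out : Int) : Decidable (Spec_FindNTstack sequence nt out) := by unfold Spec_FindNTstack; infer_instance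

-- ===== CLAIM (what is proved, stated in full; the proofs are below) =====
def Claim_equal_FindNTstack : Prop := ∀ (sequence : String) (nt : String), Dom_FindNTstack sequence nt → Spec_FindNTstack sequence nt (FindNTstack sequence nt)

-- ===== LEMMAS AND PROOFS =====

-- trailing run of matches of s, as the length of the matching prefix of s.reverse
def pvRun (nt : List Char) (s : List Char) : Nat :=
  (s.reverse.takeWhile (fun c => nt == [c])).length

lemma pvRun_append (nt s : List Char) (c : Char) :
    pvRun nt (s ++ [c]) = if nt == [c] then pvRun nt s + 1 else 0 := by
  simp [pvRun, List.takeWhile]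
  split <;> simp_all

lemma takeWhile_len_ge {α : Type} (p : α → Bool) :
    ∀ (l : List α) (k : Nat), k ≤ (l.takeWhile p).length ↔ k ≤ l.length ∧ (l.take k).all p
  | l, 0 => by simp
  | [], (k+1) => by simp
  | (x :: l), (k+1) => by
    by_cases h : p x
    · simp [List.takeWhile, h, takeWhile_len_ge p l k]
    · simp [List.takeWhile, h]


lemma pvEq_nat (nt s : List Char) (j : Nat) (h : j < s.length) :
    pvEq s (j : Int) nt = (nt == [s[j]]) := by
  simp [pvEq, List.getElem?_eq_getElem h]

lemma pvEq_int (nt s : List Char) (j : Int) (h0 : 0 ≤ j) (h : j < (s.length : Int)) :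
    pvEq s j nt = (nt == [s[j.toNat]'(by omega)]) := by
  obtain ⟨k, rfl⟩ := Int.eq_ofNat_of_zero_le h0
  rw [pvEq_nat nt s k (by exact_mod_cast h)]
  simp

lemma pvEq_append_left (nt s : List Char) (c : Char) (j : Int)
    (h0 : 0 ≤ j) (h : j < (s.length : Int)) :
    pvEq (s ++ [c]) j nt = pvEq s j nt := by
  have h' : j < ((s ++ [c]).length : Int) := by simp; omega
  rw [pvEq_int nt (s ++ [c]) j h0 h', pvEq_int nt s j h0 h]
  congr 2
  exact List.getElem_append_left (by omega)

lemma take3_all {α : Type} (p : α → Bool) (l : List α) (h : 3 ≤ l.length) :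
    (l.take 3).all p = (p (l[0]'(by omega)) && p (l[1]'(by omega)) && p (l[2]'(by omega))) := by
  match l with
  | a :: b :: c :: t => simp [List.take, Bool.and_assoc]

lemma pvRun_ge_three (nt s : List Char) (h3 : 3 ≤ s.length) :
    (3 ≤ pvRun nt s) ↔
      (pvEq s ((s.length : Int) - 3) nt && pvEq s ((s.length : Int) - 2) nt
        && pvEq s ((s.length : Int) - 1) nt) = true := by
  have hr : 3 ≤ s.reverse.length := by simpa using h3
  rw [pvRun, takeWhile_len_ge, take3_all _ _ hr]
  have e0 : s.reverse[0]'(by omega) = s[s.length - 1]'(by omega) := by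
    rw [List.getElem_reverse]; congr 1
  have e1 : s.reverse[1]'(by omega) = s[s.length - 2]'(by omega) := by
    rw [List.getElem_reverse]; congr 1
  have e2 : s.reverse[2]'(by omega) = s[s.length - 3]'(by omega) := by
    rw [List.getElem_reverse]; congr 1
  rw [pvEq_int nt s _ (by omega) (by omega), pvEq_int nt s _ (by omega) (by omega),
      pvEq_int nt s _ (by omega) (by omega)]
  have t1 : ((s.length : Int) - 3).toNat = s.length - 3 := by omega
  have t2 : ((s.length : Int) - 2).toNat = s.length - 2 := by omega
  have t3 : ((s.length : Int) - 1).toNat = s.length - 1 := by omega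
  simp only [e0, e1, e2, t1, t2, t3, hr, true_and, Bool.and_eq_true]
  tauto

lemma takeWhile_len_le {α : Type} (p : α → Bool) (l : List α) :
    (l.takeWhile p).length ≤ l.length := by
  induction l with
  | nil => simp
  | cons a t ih => by_cases h : p a <;> simp [List.takeWhile, h]; omega

lemma pvRun_le (nt s : List Char) : pvRun nt s ≤ s.length := by
  have := takeWhile_len_le (fun c => nt == [c]) s.reverse
  simpa [pvRun] using this

lemma pvEq_append_last (nt s : List Char) (c : Char) :
    pvEq (s ++ [c]) ((s.length : Int)) nt = (nt == [c]) := by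
  have h : ((s.length : Int)) < (((s ++ [c]).length : Int)) := by simp
  rw [pvEq_int nt (s ++ [c]) _ (by omega) h]
  congr 2
  simp

-- the invariant of the two folds
lemma pvInvariant (nt : List Char) (s : List Char) :
    ((PySem.List.enumerate s 0).foldl
      (fun (st : Int × Int × Int) p =>
        let run := if nt == [p.2] then st.1 + 1 else 0
        if run ≥ 4 then (run, st.2.1 + 1, p.1 - 3) else (run, st.2.1, st.2.2))
      (0, 0, 0)) =
    (((pvRun nt s : Int),
      ((PySem.List.pyRange 0 ((s.length : Int) - 3) 1).foldl
        (fun (st : Int × Int) i =>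
          if pvEq s i nt && pvEq s (i+1) nt && pvEq s (i+2) nt && pvEq s (i+3) nt
          then (st.1 + 1, i) else st) (0, 0)))) := by
  induction s using List.reverseRecOn with
  | nil =>
    simp [PySem.List.enumerate, pvRun]
  | append_singleton s c ih =>
    rw [PySem.List.enumerate_append, List.foldl_append, ih]
    simp only [PySem.List.enumerate_cons, PySem.List.enumerate_nil,
      List.foldl_cons, List.foldl_nil]
    by_cases hn : 3 ≤ s.length
    · -- the new range gains exactly the index s.length - 3
      have hb : ((s ++ [c]).length : Int) - 3 = ((s.length : Int) - 3) + 1 := by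
        simp; omega
      rw [hb, PySem.List.pyRange_one_succ_right (by omega), List.foldl_append]
      -- on the old indices the window test ignores the appended char
      have hcongr :
          (PySem.List.pyRange 0 ((s.length : Int) - 3) 1).foldl
            (fun (st : Int × Int) i =>
              if pvEq (s ++ [c]) i nt && pvEq (s ++ [c]) (i+1) nt && pvEq (s ++ [c]) (i+2) nt
                  && pvEq (s ++ [c]) (i+3) nt
              then (st.1 + 1, i) else st) (0, 0) =
          (PySem.List.pyRange 0 ((s.length : Int) - 3) 1).foldl
            (fun (st : Int × Int) i =>
              if pvEq s i nt && pvEq s (i+1) nt && pvEq s (i+2) nt && pvEq s (i+3) nt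
              then (st.1 + 1, i) else st) (0, 0) := by
        refine PySem.List.foldl_congr_mem _ _ _ _ (fun acc i hi => ?_)
        have hmem := (PySem.List.mem_pyRange_one).1 hi
        rw [pvEq_append_left nt s c i (by omega) (by omega),
            pvEq_append_left nt s c (i+1) (by omega) (by omega),
            pvEq_append_left nt s c (i+2) (by omega) (by omega),
            pvEq_append_left nt s c (i+3) (by omega) (by omega)]
      rw [hcongr]
      simp only [List.foldl_cons, List.foldl_nil]
      -- the window test at the new index is the run-length test
      have h1 : (s.length : Int) - 3 + 1 = (s.length : Int) - 2 := by ring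
      have h2 : (s.length : Int) - 3 + 2 = (s.length : Int) - 1 := by ring
      have h3 : (s.length : Int) - 3 + 3 = (s.length : Int) := by ring
      rw [h1, h2, h3, pvEq_append_last nt s c,
          pvEq_append_left nt s c _ (by omega) (by omega),
          pvEq_append_left nt s c _ (by omega) (by omega),
          pvEq_append_left nt s c _ (by omega) (by omega)]
      rw [pvRun_append]
      by_cases hc : (nt == [c]) = true
      · simp only [hc, if_true, Bool.and_true]
        by_cases hw : (pvEq s ((s.length : Int) - 3) nt && pvEq s ((s.length : Int) - 2) nt
            && pvEq s ((s.length : Int) - 1) nt) = true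
        · have hge : (3 : Int) ≤ (pvRun nt s : Int) := by
            exact_mod_cast (pvRun_ge_three nt s hn).2 hw
          rw [hw, if_pos rfl, if_pos (by omega : ((pvRun nt s : Int) + 1) ≥ 4)]
          have hz : (0 : Int) + (s.length : Int) - 3 = (s.length : Int) - 3 := by ring
          rw [hz]; push_cast; rfl
        · have hlt : ¬ (3 ≤ pvRun nt s) := fun h => hw ((pvRun_ge_three nt s hn).1 h)
          rw [if_neg hw, if_neg (by omega : ¬ ((pvRun nt s : Int) + 1 ≥ 4))]
          push_cast; rfl
      · rw [Bool.not_eq_true] at hc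
        simp only [hc, Bool.and_false, Bool.false_eq_true, if_false]
        rw [if_neg (by omega : ¬ ((0 : Int) ≥ 4))]
        simp
    · -- s.length ≤ 2 : both ranges are empty and the run cannot reach 4
      have hr1 : PySem.List.pyRange 0 ((s.length : Int) - 3) 1 = [] :=
        PySem.List.pyRange_one_eq_nil (by omega)
      have hr2 : PySem.List.pyRange 0 (((s ++ [c]).length : Int) - 3) 1 = [] :=
        PySem.List.pyRange_one_eq_nil (by simp; omega)
      rw [hr1, hr2]
      simp only [List.foldl_nil]
      have hle : pvRun nt s ≤ s.length := pvRun_le nt s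
      rw [pvRun_append]
      by_cases hc : (nt == [c]) = true
      · simp only [hc, if_true]
        rw [if_neg (by omega : ¬ ((pvRun nt s : Int) + 1 ≥ 4))]
        push_cast; rfl
      · rw [Bool.not_eq_true] at hc
        simp only [hc, Bool.false_eq_true, if_false]
        rw [if_neg (by omega : ¬ ((0 : Int) ≥ 4))]
        simp

-- ===== VERDICT (by name: the statement is the Claim_ definition above) =====
theorem FindNTstack_spec : Claim_equal_FindNTstack := by
  intro sequence nt _
  unfold Spec_FindNTstack FindNTstack FindNTstack_alt
  rw [pvInvariant nt.toList sequence.toList]
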